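-- pv_equiv track=rewrite | github.com/killmongerinheret-beep/wondersofrome_app | tools/cleanup_colosseum.py | remove_phrase_repetitions
-- ===== SOURCE A (Python) =====
-- def remove_phrase_repetitions(text: str, max_occurrences: int = 3) -> str:
--     """Remove phrases that appear too many times throughout text"""
--     sentences = text.split('. ')
--
--     # Count occurrences
--     phrase_counts = {}
--     for sentence in sentences:
--         if len(sentence) > 20:  # Only check substantial phrases
--             phrase_counts[sentence] = phrase_counts.get(sentence, 0) + 1
--
--     # Keep only first N occurrences of each phrase
--     phrase_seen = {}
--     cleaned = []
--
--     for sentence in sentences: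
--         if sentence in phrase_counts and phrase_counts[sentence] > max_occurrences:
--             count = phrase_seen.get(sentence, 0)
--             if count < max_occurrences:
--                 cleaned.append(sentence)
--                 phrase_seen[sentence] = count + 1
--         else:
--             cleaned.append(sentence)
--
--     return '. '.join(cleaned)
-- ===== SOURCE B (Python) =====
-- def remove_phrase_repetitions(text: str, max_occurrences: int = 3) -> str:
--     """Remove phrases that appear too many times throughout text"""
--     sentences = text.split('. ')
--
--     # Group the positions of every substantial sentence
--     positions = {}
--     for i, s in enumerate(sentences):
--         if len(s) > 20:
--             positions.setdefault(s, []).append(i)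
--
--     # Indices past the per-phrase quota form the removal set
--     drop = set()
--     for pos_list in positions.values():
--         for rank, p in enumerate(pos_list):
--             if rank >= max_occurrences:
--                 drop.add(p)
--
--     return '. '.join(s for i, s in enumerate(sentences) if i not in drop)
-- ===== Notes on version B (the rewrite author's own statement) =====
-- stated objective: alternative
-- what changed: A's live per-phrase seen-counter streaming loop is replaced by a staged index-based pipeline: one pass groups each substantial sentence's positions into a dict, a second pass turns every position of rank >= max_occurrences into a set of indices to drop, and the result is rebuilt by joining the sentences whose index is not in that set.
import Mathlib
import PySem

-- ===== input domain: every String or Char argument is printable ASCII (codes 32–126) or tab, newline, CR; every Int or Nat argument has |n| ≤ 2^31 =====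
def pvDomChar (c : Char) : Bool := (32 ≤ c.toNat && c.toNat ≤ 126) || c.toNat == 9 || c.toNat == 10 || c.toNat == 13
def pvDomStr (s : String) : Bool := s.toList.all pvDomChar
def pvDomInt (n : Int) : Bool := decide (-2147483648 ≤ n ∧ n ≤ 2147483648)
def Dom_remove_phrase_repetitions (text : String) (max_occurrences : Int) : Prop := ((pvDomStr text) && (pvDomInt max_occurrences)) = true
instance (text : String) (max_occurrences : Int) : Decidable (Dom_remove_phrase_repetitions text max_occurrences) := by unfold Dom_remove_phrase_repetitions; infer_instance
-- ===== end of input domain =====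

-- B replaces A's live per-phrase seen-counter loop by a staged pipeline: a positions dict
-- for substantial sentences, a set of over-quota indices, and a join skipping that set
-- (objective: alternative decomposition; same cost).

-- ===== PORT A =====
-- the first loop: phrase_counts[sentence] = phrase_counts.get(sentence, 0) + 1 for substantial sentences
def pvCountsA (sentences : List String) : PySem.Dict String Int :=
  sentences.foldl (fun d s => if 20 < PySem.Str.len s then d.insert s (d.getD s 0 + 1) else d)
    PySem.Dict.empty

-- the body of A's second loop (phrase_seen, cleaned as the fold state)
def pvStepA (phrase_counts : PySem.Dict String Int) (max_occurrences : Int)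
    (st : PySem.Dict String Int × List String) (sentence : String) :
    PySem.Dict String Int × List String :=
  if phrase_counts.contains sentence && decide (max_occurrences < phrase_counts.getD sentence 0) then
    -- count = phrase_seen.get(sentence, 0)
    if st.1.getD sentence 0 < max_occurrences then
      (st.1.insert sentence (st.1.getD sentence 0 + 1), st.2 ++ [sentence])
    else st
  else (st.1, st.2 ++ [sentence])

def remove_phrase_repetitions (text : String) (max_occurrences : Int) : String :=
  let sentences := (PySem.Str.split? text ". ").getD []  -- separator ". " ≠ "", so split? is always some: exact
  let phrase_counts := pvCountsA sentences
  let st := sentences.foldl (pvStepA phrase_counts max_occurrences) (PySem.Dict.empty, [])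
  PySem.Str.join ". " st.2

-- ===== PORT B =====
-- B's first loop: positions.setdefault(s, []).append(i)  =  positions[s] = positions.get(s, []) + [i]
def pvPositions (sentences : List String) : PySem.Dict String (List Int) :=
  (PySem.List.enumerate sentences 0).foldl
    (fun d p => if 20 < PySem.Str.len p.2 then d.modify p.2 [] (· ++ [p.1]) else d)
    PySem.Dict.empty

-- B's second loop: for pos_list in positions.values(): for rank, p in enumerate(pos_list): if rank >= m: drop.add(p)
def pvDrop (positions : PySem.Dict String (List Int)) (max_occurrences : Int) : PySem.Set Int :=
  positions.values.foldl
    (fun dr ps => (PySem.List.enumerate ps 0).foldl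
        (fun dr q => if max_occurrences ≤ q.1 then PySem.Set.add dr q.2 else dr) dr)
    PySem.Set.empty

def remove_phrase_repetitions_alt (text : String) (max_occurrences : Int) : String :=
  let sentences := (PySem.Str.split? text ". ").getD []  -- separator ". " ≠ "", so split? is always some: exact
  let drop := pvDrop (pvPositions sentences) max_occurrences
  PySem.Str.join ". "
    (((PySem.List.enumerate sentences 0).filter (fun p => !(PySem.Set.contains drop p.1))).map (·.2))

-- ===== PRECONDITION & SPEC =====
def Spec_remove_phrase_repetitions (text : String) (max_occurrences : Int) (out : String) : Prop := out = remove_phrase_repetitions_alt text max_occurrences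
instance (text : String) (max_occurrences : Int) (out : String) : Decidable (Spec_remove_phrase_repetitions text max_occurrences out) := by unfold Spec_remove_phrase_repetitions; infer_instance

-- ===== CLAIM (what is proved, stated in full; the proofs are below) =====
def Claim_equal_remove_phrase_repetitions : Prop := ∀ (text : String) (max_occurrences : Int), Dom_remove_phrase_repetitions text max_occurrences → Spec_remove_phrase_repetitions text max_occurrences (remove_phrase_repetitions text max_occurrences)

-- ===== LEMMAS AND PROOFS =====

-- the common keep predicate both programs are reduced to: sentence p.2 at index p.1 stays iff
-- it is short, globally rare, or still under quota among the first p.1 sentences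
def pvKeep (L : List String) (m : Int) (p : Int × String) : Bool :=
  decide (PySem.Str.len p.2 ≤ 20)
    || decide ((L.count p.2 : Int) ≤ m)
    || decide (((L.take p.1.toNat).count p.2 : Int) < m)

-- ============ A SIDE: the streaming loop is the pvKeep filter ============

theorem pvCountsA_getD_aux (L : List String) : ∀ (d : PySem.Dict String Int) (v : String),
    (L.foldl (fun d s => if 20 < PySem.Str.len s then d.insert s (d.getD s 0 + 1) else d) d).getD v 0
      = d.getD v 0 + (if 20 < PySem.Str.len v then (List.count v L : Int) else 0) := by
  induction L with
  | nil => intro d v; simp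
  | cons s t ih =>
    intro d v
    simp only [List.foldl_cons]
    rw [ih]
    by_cases hv : v = s
    · subst hv
      by_cases hs : 20 < PySem.Str.len v
      · rw [if_pos hs, if_pos hs, if_pos hs, PySem.Dict.getD_insert_self,
          List.count_cons_self]
        push_cast; ring
      · rw [if_neg hs, if_neg hs, if_neg hs]
    · have hsv : s ≠ v := fun h => hv h.symm
      rw [List.count_cons_of_ne hsv]
      by_cases hs : 20 < PySem.Str.len s
      · rw [if_pos hs, PySem.Dict.getD_insert_of_ne _ _ _ hv]
      · rw [if_neg hs]

theorem pvCountsA_contains_mono (L : List String) : ∀ (d : PySem.Dict String Int) (v : String),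
    d.contains v = true →
    (L.foldl (fun d s => if 20 < PySem.Str.len s then d.insert s (d.getD s 0 + 1) else d) d).contains v = true := by
  induction L with
  | nil => intro d v h; simpa using h
  | cons s t ih =>
    intro d v h
    simp only [List.foldl_cons]
    apply ih
    by_cases hs : 20 < PySem.Str.len s
    · rw [if_pos hs, PySem.Dict.contains_insert]
      simp [h]
    · rw [if_neg hs]; exact h

theorem pvCountsA_contains_pos (L : List String) : ∀ (d : PySem.Dict String Int) (v : String),
    v ∈ L → 20 < PySem.Str.len v →
    (L.foldl (fun d s => if 20 < PySem.Str.len s then d.insert s (d.getD s 0 + 1) else d) d).contains v = true := by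
  induction L with
  | nil => intro d v h; simp at h
  | cons s t ih =>
    intro d v hmem hv
    simp only [List.foldl_cons]
    rcases List.mem_cons.mp hmem with h | h
    · subst h
      apply pvCountsA_contains_mono
      rw [if_pos hv]
      exact PySem.Dict.contains_insert_self _ _ _
    · exact ih _ v h hv

theorem pvCountsA_contains_neg (L : List String) : ∀ (d : PySem.Dict String Int) (v : String),
    ¬ 20 < PySem.Str.len v →
    (L.foldl (fun d s => if 20 < PySem.Str.len s then d.insert s (d.getD s 0 + 1) else d) d).contains v = d.contains v := by
  induction L with
  | nil => intro d v h; simp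
  | cons s t ih =>
    intro d v hv
    simp only [List.foldl_cons]
    rw [ih _ v hv]
    by_cases hs : 20 < PySem.Str.len s
    · have hne : v ≠ s := by intro h; exact hv (h ▸ hs)
      rw [if_pos hs, PySem.Dict.contains_insert]
      simp [hne]
    · rw [if_neg hs]

-- A's loop condition, rewritten through the dict characterisation (s must occur in L)
theorem pvCondA (L : List String) (m : Int) (s : String) (hmem : s ∈ L) :
    ((pvCountsA L).contains s && decide (m < (pvCountsA L).getD s 0))
      = (decide (20 < PySem.Str.len s) && decide (m < (List.count s L : Int))) := by
  unfold pvCountsA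
  by_cases hs : 20 < PySem.Str.len s
  · rw [pvCountsA_contains_pos L _ s hmem hs, pvCountsA_getD_aux L _ s,
      PySem.Dict.getD_empty, if_pos hs, zero_add, Bool.true_and,
      decide_eq_true hs, Bool.true_and]
  · rw [pvCountsA_contains_neg L _ s hs, PySem.Dict.contains_empty, Bool.false_and,
      decide_eq_false hs, Bool.false_and]

-- the invariant relating A's phrase_seen dict to the processed prefix
def pvInv (L pre : List String) (m : Int) (seen : PySem.Dict String Int) : Prop :=
  ∀ s, 20 < PySem.Str.len s → m < (List.count s L : Int) →
    seen.getD s 0 = min ((List.count s pre : Int)) (max m 0)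

theorem pvCountAppendNe (pre : List String) (s v : String) (h : v ≠ s) :
    List.count v (pre ++ [s]) = List.count v pre := by
  have hsv : s ≠ v := fun hh => h hh.symm
  simp [List.count_append, hsv]

theorem pvCountAppendSelf (pre : List String) (v : String) :
    List.count v (pre ++ [v]) = List.count v pre + 1 := by
  simp

-- A's second loop produces exactly the pvKeep-filtered list
theorem pvLoopA (m : Int) (L : List String) : ∀ (t pre : List String)
    (seen : PySem.Dict String Int) (acc : List String),
    L = pre ++ t → pvInv L pre m seen →
    (t.foldl (pvStepA (pvCountsA L) m) (seen, acc)).2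
      = acc ++ ((PySem.List.enumerate t (pre.length : Int)).filter (pvKeep L m)).map (·.2) := by
  intro t
  induction t with
  | nil => intro pre seen acc _ _; simp [PySem.List.enumerate_nil]
  | cons s t ih =>
    intro pre seen acc hL hinv
    have hmem : s ∈ L := by rw [hL]; simp
    have hpre : L.take (((pre.length : Nat) : Int)).toNat = pre := by
      rw [hL]; simp
    have hkeep : pvKeep L m ((pre.length : Int), s)
        = (decide (PySem.Str.len s ≤ 20) || decide ((List.count s L : Int) ≤ m)
            || decide ((List.count s pre : Int) < m)) := by
      simp only [pvKeep, hpre]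
    have hL' : L = (pre ++ [s]) ++ t := by rw [hL]; simp
    have harr : ((pre.length : Int) + 1) = (((pre ++ [s]).length : Nat) : Int) := by
      simp
    simp only [List.foldl_cons, PySem.List.enumerate_cons]
    by_cases hs : 20 < PySem.Str.len s
    · by_cases hc : m < (List.count s L : Int)
      · -- substantial and frequent: A consults phrase_seen
        have hseen : seen.getD s 0 = min ((List.count s pre : Int)) (max m 0) := hinv s hs hc
        by_cases hlt : seen.getD s 0 < m
        · -- kept: still under quota
          have hcnt : (List.count s pre : Int) < m := by
            rw [hseen] at hlt; omega
          have step : pvStepA (pvCountsA L) m (seen, acc) s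
              = (seen.insert s (seen.getD s 0 + 1), acc ++ [s]) := by
            unfold pvStepA
            rw [pvCondA L m s hmem, decide_eq_true hs, decide_eq_true hc, Bool.true_and,
              if_pos rfl, if_pos hlt]
          have hinv' : pvInv L (pre ++ [s]) m (seen.insert s (seen.getD s 0 + 1)) := by
            intro v hv hvc
            by_cases hvs : v = s
            · subst hvs
              rw [PySem.Dict.getD_insert_self, hseen, pvCountAppendSelf]
              push_cast
              omega
            · rw [PySem.Dict.getD_insert_of_ne _ _ _ hvs, hinv v hv hvc, pvCountAppendNe _ _ _ hvs]
          have hkt : pvKeep L m ((pre.length : Int), s) = true := by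
            rw [hkeep, decide_eq_true hcnt]
            simp
          rw [step, List.filter_cons, hkt, if_pos rfl, List.map_cons, harr,
            ih (pre ++ [s]) _ (acc ++ [s]) hL' hinv']
          simp
        · -- dropped: quota exhausted
          have hcnt : ¬ (List.count s pre : Int) < m := by
            rw [hseen] at hlt; omega
          have step : pvStepA (pvCountsA L) m (seen, acc) s = (seen, acc) := by
            unfold pvStepA
            rw [pvCondA L m s hmem, decide_eq_true hs, decide_eq_true hc, Bool.true_and,
              if_pos rfl, if_neg hlt]
          have hinv' : pvInv L (pre ++ [s]) m seen := by
            intro v hv hvc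
            by_cases hvs : v = s
            · subst hvs
              rw [hseen] at hlt ⊢
              rw [pvCountAppendSelf]
              push_cast
              omega
            · rw [hinv v hv hvc, pvCountAppendNe _ _ _ hvs]
          have hkt : pvKeep L m ((pre.length : Int), s) = false := by
            rw [hkeep, decide_eq_false (by omega : ¬ PySem.Str.len s ≤ 20),
              decide_eq_false (by omega : ¬ (List.count s L : Int) ≤ m), decide_eq_false hcnt]
            simp
          rw [step, List.filter_cons, hkt]
          simp only [Bool.false_eq_true, if_false]
          rw [harr]
          exact ih (pre ++ [s]) _ acc hL' hinv'
      · -- rare sentence: always kept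
        have step : pvStepA (pvCountsA L) m (seen, acc) s = (seen, acc ++ [s]) := by
          unfold pvStepA
          rw [pvCondA L m s hmem, decide_eq_false hc, Bool.and_false, if_neg (by simp)]
        have hinv' : pvInv L (pre ++ [s]) m seen := by
          intro v hv hvc
          have hvs : v ≠ s := by intro h; subst h; exact hc hvc
          rw [hinv v hv hvc, pvCountAppendNe _ _ _ hvs]
        have hkt : pvKeep L m ((pre.length : Int), s) = true := by
          rw [hkeep, decide_eq_true (by omega : (List.count s L : Int) ≤ m)]
          simp
        rw [step, List.filter_cons, hkt, if_pos rfl, List.map_cons, harr,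
          ih (pre ++ [s]) _ (acc ++ [s]) hL' hinv']
        simp
    · -- short sentence: always kept
      have step : pvStepA (pvCountsA L) m (seen, acc) s = (seen, acc ++ [s]) := by
        unfold pvStepA
        rw [pvCondA L m s hmem, decide_eq_false hs, Bool.false_and, if_neg (by simp)]
      have hinv' : pvInv L (pre ++ [s]) m seen := by
        intro v hv hvc
        have hvs : v ≠ s := by intro h; subst h; exact hs hv
        rw [hinv v hv hvc, pvCountAppendNe _ _ _ hvs]
      have hkt : pvKeep L m ((pre.length : Int), s) = true := by
        rw [hkeep, decide_eq_true (by omega : PySem.Str.len s ≤ 20)]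
        simp
      rw [step, List.filter_cons, hkt, if_pos rfl, List.map_cons, harr,
        ih (pre ++ [s]) _ (acc ++ [s]) hL' hinv']
      simp

-- ============ B SIDE: the drop set is the complement of the pvKeep filter ============

-- the index list of substantial sentence s in L
def pvIdx (L : List String) (s : String) : List Int :=
  (((PySem.List.enumerate L 0).filter (fun p => decide (20 < PySem.Str.len p.2))).filter
      (fun p => p.2 == s)).map (·.1)

theorem pvPositions_getD (L : List String) (s : String) :
    (pvPositions L).getD s [] = pvIdx L s := by
  unfold pvPositions
  rw [PySem.List.foldl_ite_eq_foldl_filter]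
  rw [show ((PySem.List.enumerate L 0).filter (fun p => decide (20 < PySem.Str.len p.2))).foldl
      (fun d p => d.modify p.2 [] (· ++ [p.1])) PySem.Dict.empty
    = (((PySem.List.enumerate L 0).filter (fun p => decide (20 < PySem.Str.len p.2))).map
        (fun p => (p.2, p.1))).foldl (fun d q => d.modify q.1 [] (· ++ [q.2])) PySem.Dict.empty
    from by rw [List.foldl_map]]
  rw [PySem.Dict.getD_foldl_modify_append]
  simp [pvIdx, List.filter_map, Function.comp_def, List.map_map]

theorem pvPositions_values (L : List String) :
    (pvPositions L).values
      = (PySem.Set.ofList (((PySem.List.enumerate L 0).filter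
            (fun p => decide (20 < PySem.Str.len p.2))).map (·.2))).map (pvIdx L) := by
  have hkeys : (pvPositions L).keys
      = PySem.Set.ofList (((PySem.List.enumerate L 0).filter
          (fun p => decide (20 < PySem.Str.len p.2))).map (·.2)) := by
    unfold pvPositions
    rw [PySem.List.foldl_ite_eq_foldl_filter, PySem.Dict.keys_foldl_modify_key]
    simp [PySem.Set.update_nil_left]
  have hnd : (pvPositions L).keys.Nodup := by
    unfold pvPositions
    rw [PySem.List.foldl_ite_eq_foldl_filter]
    exact PySem.Dict.nodup_keys_foldl_modify_key _ _ _ _ _ (by simp)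
  rw [PySem.Dict.values_eq_map_keys _ hnd [], hkeys]
  exact List.map_congr_left (fun k _ => pvPositions_getD L k)

theorem pvDrop_foldl_mem (m : Int) (vs : List (List Int)) : ∀ (dr : PySem.Set Int) (i : Int),
    (i ∈ vs.foldl (fun dr ps => (PySem.List.enumerate ps 0).foldl
        (fun dr q => if m ≤ q.1 then PySem.Set.add dr q.2 else dr) dr) dr)
      ↔ i ∈ dr ∨ ∃ ps ∈ vs, ∃ q ∈ PySem.List.enumerate ps 0, m ≤ q.1 ∧ i = q.2 := by
  induction vs with
  | nil => intro dr i; simp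
  | cons ps t ih =>
    intro dr i
    simp only [List.foldl_cons]
    rw [ih]
    rw [PySem.List.foldl_ite_eq_foldl_filter, PySem.Set.mem_foldl_add (f := fun q : Int × Int => q.2)]
    simp only [List.mem_filter, List.mem_cons, decide_eq_true_eq]
    constructor
    · rintro (⟨h | ⟨q, ⟨hq, hm⟩, he⟩⟩ | ⟨ps', h, hq⟩)
      · exact .inl h
      · exact .inr ⟨ps, .inl rfl, q, hq, hm, he⟩
      · exact .inr ⟨ps', .inr h, hq⟩
    · rintro (h | ⟨ps', hps, q, hq, hm, he⟩)
      · exact .inl (.inl h)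
      · rcases hps with rfl | hps
        · exact .inl (.inr ⟨q, ⟨hq, hm⟩, he⟩)
        · exact .inr ⟨ps', hps, q, hq, hm, he⟩

theorem pvDrop_mem (L : List String) (m : Int) (i : Int) :
    i ∈ pvDrop (pvPositions L) m
      ↔ ∃ s, s ∈ ((PySem.List.enumerate L 0).filter
            (fun p => decide (20 < PySem.Str.len p.2))).map (·.2)
          ∧ ∃ q ∈ PySem.List.enumerate (pvIdx L s) 0, m ≤ q.1 ∧ i = q.2 := by
  unfold pvDrop
  rw [pvDrop_foldl_mem, pvPositions_values]
  simp only [List.mem_map, PySem.Set.mem_ofList]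
  constructor
  · rintro (h | ⟨ps, ⟨s, hs, rfl⟩, hq⟩)
    · simp [PySem.Set.empty] at h
    · exact ⟨s, hs, hq⟩
  · rintro ⟨s, hs, hq⟩
    exact .inr ⟨pvIdx L s, ⟨s, hs, rfl⟩, hq⟩

theorem pvIdx_append (L : List String) (x s : String) :
    pvIdx (L ++ [x]) s
      = pvIdx L s ++ (if 20 < PySem.Str.len x ∧ x = s then [((L.length : Nat) : Int)] else []) := by
  unfold pvIdx
  rw [PySem.List.enumerate_append]
  simp only [List.filter_append, List.map_append, PySem.List.enumerate_cons,
    PySem.List.enumerate_nil]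
  congr 1
  by_cases h1 : 20 < PySem.Str.len x <;> by_cases h2 : x = s <;>
    simp_all [List.filter_nil, PySem.Str.len_eq]

theorem pvIdx_length (L : List String) (s : String) (hlen : 20 < PySem.Str.len s) :
    (pvIdx L s).length = L.count s := by
  induction L using List.reverseRecOn with
  | nil => simp [pvIdx]
  | append_singleton L x ih =>
    rw [pvIdx_append, List.length_append, ih, List.count_append]
    by_cases h2 : x = s
    · subst h2
      have hl : 20 < x.length := by rw [PySem.Str.len_eq] at hlen; exact_mod_cast hlen
      simp [hl]
    · have hno : ¬ (20 < PySem.Str.len x ∧ x = s) := fun h => h2 h.2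
      simp [h2]

theorem pvIdx_sound (L : List String) (s : String) :
    ∀ r (_ : r < (pvIdx L s).length),
      ∃ k : Nat, (pvIdx L s)[r]? = some ((k : Nat) : Int) ∧ k < L.length ∧ L[k]? = some s
        ∧ (L.take k).count s = r := by
  induction L using List.reverseRecOn with
  | nil => intro r h; simp [pvIdx] at h
  | append_singleton L x ih =>
    intro r h
    rw [pvIdx_append] at h ⊢
    by_cases hr : r < (pvIdx L s).length
    · obtain ⟨k, hv, hk, hget, hcnt⟩ := ih r hr
      refine ⟨k, ?_, by simp; omega, ?_, ?_⟩
      · rw [List.getElem?_append_left hr]; exact hv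
      · rw [List.getElem?_append_left hk]; exact hget
      · rw [List.take_append_of_le_length (le_of_lt hk)]; exact hcnt
    · rw [List.length_append] at h
      have hif : (if 20 < PySem.Str.len x ∧ x = s then [((L.length : Nat) : Int)] else []) ≠ [] := by
        intro he; rw [he] at h; simp at h; omega
      have hcond : 20 < PySem.Str.len x ∧ x = s := by
        by_contra hc; rw [if_neg hc] at hif; exact hif rfl
      obtain ⟨hlen, rfl⟩ := hcond
      rw [if_pos ⟨hlen, rfl⟩] at h ⊢
      have hre : r = (pvIdx L x).length := by simp at h; omega
      subst hre
      refine ⟨L.length, ?_, by simp, by simp, ?_⟩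
      · rw [List.getElem?_append_right (le_refl _)]
        simp
      · rw [List.take_left, pvIdx_length L x hlen]

theorem pvIdx_complete (L : List String) (s : String) (k : Nat) (hk : k < L.length)
    (hs : L[k]? = some s) (hlen : 20 < PySem.Str.len s) :
    (L.take k).count s < (pvIdx L s).length
      ∧ (pvIdx L s)[(L.take k).count s]? = some ((k : Nat) : Int) := by
  induction L using List.reverseRecOn with
  | nil => simp at hk
  | append_singleton L x ih =>
    rw [pvIdx_append]
    rcases Nat.lt_or_ge k L.length with hkl | hkl
    · have hget : L[k]? = some s := by
        rw [List.getElem?_append_left hkl] at hs; exact hs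
      obtain ⟨h1, h2⟩ := ih hkl hget
      rw [List.take_append_of_le_length (le_of_lt hkl)]
      constructor
      · rw [List.length_append]; omega
      · rw [List.getElem?_append_left h1]; exact h2
    · have hke : k = L.length := by simp at hk; omega
      subst hke
      have hxs : x = s := by simp at hs; exact hs
      subst hxs
      rw [if_pos ⟨hlen, rfl⟩, List.take_left, ← pvIdx_length L x hlen]
      constructor
      · simp
      · rw [List.getElem?_append_right (le_refl _)]
        simp

theorem pvDrop_mem_iff (L : List String) (m : Int) (k : Nat) (hk : k < L.length) :
    ((k : Int) ∈ pvDrop (pvPositions L) m)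
      ↔ (20 < PySem.Str.len L[k] ∧ m ≤ ((L.take k).count L[k] : Int)) := by
  rw [pvDrop_mem]
  constructor
  · rintro ⟨s, hs, q, hq, hm, he⟩
    obtain ⟨p', hp', hps⟩ := List.mem_map.mp hs
    have hlen : 20 < PySem.Str.len s := by
      have := (List.mem_filter.mp hp').2
      rw [hps] at this
      exact of_decide_eq_true this
    obtain ⟨r, hr, rfl⟩ := (PySem.List.mem_enumerate_iff _ _ _).mp hq
    obtain ⟨k', hv, hk', hget, hcnt⟩ := pvIdx_sound L s r hr
    have hkk : k = k' := by
      have : ((k : Int)) = ((k' : Int)) := by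
        rw [he]
        have := List.getElem?_eq_getElem hr
        rw [this] at hv
        exact (Option.some_inj.mp hv) ▸ rfl
      exact_mod_cast this
    subst hkk
    have hsk : s = L[k] := by
      rw [List.getElem?_eq_getElem hk] at hget
      exact (Option.some_inj.mp hget).symm
    subst hsk
    exact ⟨hlen, by rw [hcnt]; simpa using hm⟩
  · rintro ⟨hlen, hcnt⟩
    obtain ⟨h1, h2⟩ := pvIdx_complete L L[k] k hk (List.getElem?_eq_getElem hk) hlen
    refine ⟨L[k], ?_, ((0 : Int) + ((L.take k).count L[k] : Int), (pvIdx L L[k])[(L.take k).count L[k]]'h1), ?_, ?_, ?_⟩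
    · exact List.mem_map.mpr ⟨((0 : Int) + (k : Int), L[k]),
        List.mem_filter.mpr ⟨(PySem.List.mem_enumerate_iff _ _ _).mpr ⟨k, hk, rfl⟩, decide_eq_true hlen⟩, rfl⟩
    · exact (PySem.List.mem_enumerate_iff _ _ _).mpr ⟨(L.take k).count L[k], h1, rfl⟩
    · simpa using hcnt
    · have := List.getElem?_eq_getElem h1
      rw [this] at h2
      simpa using (Option.some_inj.mp h2).symm

theorem pvCountTakeLt (L : List String) (k : Nat) (hk : k < L.length) :
    (L.take k).count L[k] < L.count L[k] := by
  have h1 : (L.take (k+1)).count L[k] = (L.take k).count L[k] + 1 := by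
    rw [List.take_add_one, List.count_append, List.getElem?_eq_getElem hk]
    simp
  have h2 : (L.take (k+1)).count L[k] ≤ L.count L[k] := (List.take_sublist _ _).count_le _
  omega

theorem pvFilter_eq (L : List String) (m : Int) :
    (PySem.List.enumerate L 0).filter (fun p => !(PySem.Set.contains (pvDrop (pvPositions L) m) p.1))
      = (PySem.List.enumerate L 0).filter (pvKeep L m) := by
  apply List.filter_congr
  intro p hp
  obtain ⟨k, hk, rfl⟩ := (PySem.List.mem_enumerate_iff _ _ _).mp hp
  have hb : PySem.Set.contains (pvDrop (pvPositions L) m) ((0 : Int) + (k : Int))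
      = decide (20 < PySem.Str.len L[k] ∧ m ≤ ((L.take k).count L[k] : Int)) := by
    rw [Bool.eq_iff_iff]
    simp only [decide_eq_true_iff]
    rw [PySem.Set.contains_iff]
    simpa using pvDrop_mem_iff L m k hk
  rw [hb]
  have hc := pvCountTakeLt L k hk
  simp only [pvKeep]
  have ht : (((0 : Int) + (k : Int)).toNat) = k := by simp
  rw [ht]
  have hcast : ((L.take k).count L[k] : Int) < (L.count L[k] : Int) := by exact_mod_cast hc
  rw [Bool.eq_iff_iff]
  simp only [Bool.not_eq_true', decide_eq_false_iff_not, Bool.or_eq_true, decide_eq_true_iff]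
  omega

-- ===== VERDICT (by name: the statement is the Claim_ definition above) =====
theorem remove_phrase_repetitions_spec : Claim_equal_remove_phrase_repetitions := by
  intro text m _
  unfold Spec_remove_phrase_repetitions remove_phrase_repetitions remove_phrase_repetitions_alt
  have h := pvLoopA m ((PySem.Str.split? text ". ").getD []) ((PySem.Str.split? text ". ").getD [])
    [] PySem.Dict.empty [] (by simp)
    (by intro s _ _; simp [PySem.Dict.getD_empty])
  simp only [List.length_nil, Nat.cast_zero, List.nil_append] at h
  dsimp only
  rw [h, ← pvFilter_eq]
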